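-- pv_equiv track=rewrite | github.com/hugomilosz/live-chat-analytics | backend/app/similarity.py | is_single_transposition
-- ===== SOURCE A (Python) =====
-- def is_single_transposition(left: str, right: str) -> bool:
--     if len(left) != len(right) or len(left) < 2:
--         return False
--
--     differences = [
--         index
--         for index, (left_character, right_character) in enumerate(
--             zip(left, right, strict=False)
--         )
--         if left_character != right_character
--     ]
--
--     if len(differences) != 2:
--         return False
--
--     first, second = differences
--     if second != first + 1:
--         return False
--
--     return left[first] == right[second] and left[second] == right[first]
-- ===== SOURCE B (Python) =====
-- def is_single_transposition(left: str, right: str) -> bool: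
--     if len(left) != len(right) or len(left) < 2:
--         return False
--     n = len(left)
--     i = 0
--     while i < n and left[i] == right[i]:
--         i += 1
--     if i >= n - 1:  # no mismatch, or mismatch at the last position: no room to swap
--         return False
--     swapped = left[:i] + left[i + 1] + left[i] + left[i + 2:]
--     return swapped == right
-- ===== Notes on version B (the rewrite author's own statement) =====
-- stated objective: simpler
-- what changed: Instead of materialising the full list of mismatch positions and checking it has exactly two adjacent entries, B scans to the first mismatch, builds the single candidate string with that pair swapped, and compares it to right in one equality test.
import Mathlib
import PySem

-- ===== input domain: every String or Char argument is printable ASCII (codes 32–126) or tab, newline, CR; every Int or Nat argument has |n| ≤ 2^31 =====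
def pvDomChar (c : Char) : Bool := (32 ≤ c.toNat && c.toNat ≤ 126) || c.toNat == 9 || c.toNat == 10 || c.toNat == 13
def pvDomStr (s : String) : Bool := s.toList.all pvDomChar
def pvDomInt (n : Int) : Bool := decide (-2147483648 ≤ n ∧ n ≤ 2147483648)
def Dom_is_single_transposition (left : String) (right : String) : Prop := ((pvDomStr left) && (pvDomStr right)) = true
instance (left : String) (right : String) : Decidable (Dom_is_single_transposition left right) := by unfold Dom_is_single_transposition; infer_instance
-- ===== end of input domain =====

-- B finds the first mismatch and compares the one adjacent-swap candidate with `right`;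
-- simpler than A's full mismatch-index list. Equal return values on all inputs (both total).

-- ===== PORT A =====
-- the list comprehension over enumerate(zip(left, right)); `s` is enumerate's start index
def pyDiffs (l r : List Char) (s : Int) : List Int :=
  ((PySem.List.enumerate (l.zip r) s).filter (fun p => p.2.1 != p.2.2)).map (·.1)

def is_single_transposition (left : String) (right : String) : Bool :=
  let l := left.toList
  let r := right.toList
  if l.length != r.length || l.length < 2 then false
  else
    let differences := pyDiffs l r 0
    if differences.length != 2 then false
    else
      -- first, second = differences  (tuple unpack of the two-element list)
      let first := differences.getD 0 0
      let second := differences.getD 1 0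
      if second != first + 1 then false
      else
        -- first/second come from enumerate so they are in range: pyGetD is exact for left[first] etc.
        (PySem.List.pyGetD l first ' ' == PySem.List.pyGetD r second ' ') &&
        (PySem.List.pyGetD l second ' ' == PySem.List.pyGetD r first ' ')

-- ===== PORT B =====
-- the while loop: number of equal leading characters (= index of the first mismatch, or the length)
def firstMismatch (l r : List Char) : Nat :=
  match l, r with
  | a :: l', b :: r' => if a == b then firstMismatch l' r' + 1 else 0
  | _, _ => 0

def is_single_transposition_alt (left : String) (right : String) : Bool :=
  let l := left.toList
  let r := right.toList
  if l.length != r.length || l.length < 2 then false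
  else
    let i := firstMismatch l r
    if l.length ≤ i + 1 then false
    else
      -- left[:i] + left[i+1] + left[i] + left[i+2:]; i+1 < length so getD is exact
      decide (l.take i ++ [l.getD (i+1) ' ', l.getD i ' '] ++ l.drop (i+2) = r)

-- ===== PRECONDITION & SPEC =====
def Spec_is_single_transposition (left : String) (right : String) (out : Bool) : Prop := out = is_single_transposition_alt left right
instance (left : String) (right : String) (out : Bool) : Decidable (Spec_is_single_transposition left right out) := by unfold Spec_is_single_transposition; infer_instance

-- ===== CLAIM (what is proved, stated in full; the proofs are below) =====
def Claim_equal_is_single_transposition : Prop := ∀ (left : String) (right : String), Dom_is_single_transposition left right → Spec_is_single_transposition left right (is_single_transposition left right)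

-- ===== LEMMAS AND PROOFS =====

-- the two bodies after the common guard
def aCore (l r : List Char) : Bool :=
  let differences := pyDiffs l r 0
  if differences.length != 2 then false
  else
    let first := differences.getD 0 0
    let second := differences.getD 1 0
    if second != first + 1 then false
    else
      (PySem.List.pyGetD l first ' ' == PySem.List.pyGetD r second ' ') &&
      (PySem.List.pyGetD l second ' ' == PySem.List.pyGetD r first ' ')

def bCore (l r : List Char) : Bool :=
  let i := firstMismatch l r
  if l.length ≤ i + 1 then false
  else decide (l.take i ++ [l.getD (i+1) ' ', l.getD i ' '] ++ l.drop (i+2) = r)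

lemma pyDiffs_nil_left (r : List Char) (s : Int) : pyDiffs [] r s = [] := by
  simp [pyDiffs]

lemma pyDiffs_nil_right (l : List Char) (s : Int) : pyDiffs l [] s = [] := by
  simp [pyDiffs]

lemma pyDiffs_cons (a b : Char) (l r : List Char) (s : Int) :
    pyDiffs (a :: l) (b :: r) s =
      if a = b then pyDiffs l r (s+1) else s :: pyDiffs l r (s+1) := by
  by_cases h : a = b <;>
    simp [pyDiffs, PySem.List.enumerate_cons, h]

lemma pyDiffs_shift (l : List Char) (r : List Char) (s : Int) :
    pyDiffs l r (s+1) = (pyDiffs l r s).map (· + 1) := by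
  induction l generalizing r s with
  | nil => simp [pyDiffs_nil_left]
  | cons a l ih =>
    cases r with
    | nil => simp [pyDiffs_nil_right]
    | cons b r =>
      by_cases h : a = b <;> simp [pyDiffs_cons, h, ih]

lemma pyDiffs_nil_iff (l r : List Char) (s : Int) (hlen : l.length = r.length) :
    pyDiffs l r s = [] ↔ l = r := by
  induction l generalizing r s with
  | nil => cases r <;> simp [pyDiffs_nil_left] at hlen ⊢
  | cons a l ih =>
    cases r with
    | nil => simp at hlen
    | cons b r =>
      simp only [List.length_cons, Nat.add_right_cancel_iff] at hlen
      by_cases h : a = b <;> simp [pyDiffs_cons, h, ih _ _ hlen]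

lemma mem_pyDiffs (l r : List Char) (s x : Int) (h : x ∈ pyDiffs l r s) :
    ∃ k : Nat, k < (l.zip r).length ∧ x = s + k := by
  simp only [pyDiffs, List.mem_map, List.mem_filter] at h
  obtain ⟨p, ⟨hp, _⟩, rfl⟩ := h
  rw [PySem.List.mem_enumerate_iff] at hp
  obtain ⟨k, hk, rfl⟩ := hp
  exact ⟨k, hk, rfl⟩

lemma pyGetD_cons_succ (a : Char) (l : List Char) (f : Int) (hf : 0 ≤ f) :
    PySem.List.pyGetD (a :: l) (f + 1) ' ' = PySem.List.pyGetD l f ' ' := by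
  obtain ⟨n, rfl⟩ := Int.eq_ofNat_of_zero_le hf
  have : ((n : Int) + 1) = ((n + 1 : Nat) : Int) := by push_cast; ring
  rw [this, PySem.List.pyGetD_natCast, PySem.List.pyGetD_natCast]
  simp [List.getD]

lemma core_eq (l r : List Char) (hlen : l.length = r.length) : aCore l r = bCore l r := by
  induction l generalizing r with
  | nil =>
    cases r with
    | nil => simp [aCore, bCore, pyDiffs_nil_left, firstMismatch]
    | cons b r => simp at hlen
  | cons a l ih =>
    cases r with
    | nil => simp at hlen
    | cons b r =>
      simp only [List.length_cons, Nat.add_right_cancel_iff] at hlen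
      by_cases hab : a = b
      · -- equal heads: both sides reduce to the tails
        subst hab
        have hA : aCore (a :: l) (a :: r) = aCore l r := by
          unfold aCore
          rw [pyDiffs_cons, if_pos rfl, pyDiffs_shift]
          rcases hds : pyDiffs l r 0 with _ | ⟨f, _ | ⟨s, _ | ⟨t, ds⟩⟩⟩
          · simp
          · simp
          · have hf : 0 ≤ f := by
              obtain ⟨k, _, rfl⟩ := mem_pyDiffs l r 0 f (by rw [hds]; simp)
              omega
            have hs : 0 ≤ s := by
              obtain ⟨k, _, rfl⟩ := mem_pyDiffs l r 0 s (by rw [hds]; simp)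
              omega
            simp only [List.map_cons, List.map_nil]
            simp only [show (([f+1, s+1] : List Int).length != 2) = false from rfl,
              show (([f, s] : List Int).length != 2) = false from rfl,
              Bool.false_eq_true, if_false, List.getD_cons_zero, List.getD_cons_succ]
            by_cases hadj : s = f + 1
            · subst hadj
              have e1 : ((f + 1 + 1 : Int) != f + 1 + 1) = false := by simp
              have e2 : ((f + 1 : Int) != f + 1) = false := by simp
              simp only [e1, e2, Bool.false_eq_true, if_false]
              rw [pyGetD_cons_succ a l f hf, pyGetD_cons_succ a r (f+1) (by omega),
                  pyGetD_cons_succ a l (f+1) (by omega), pyGetD_cons_succ a r f hf]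
            · have e1 : ((s + 1 : Int) != f + 1 + 1) = true := by
                simp only [bne_iff_ne]; omega
              have e2 : ((s : Int) != f + 1) = true := by
                simp only [bne_iff_ne]; exact hadj
              simp only [e1, e2, if_true]
          · simp
        have hB : bCore (a :: l) (a :: r) = bCore l r := by
          unfold bCore
          simp only [firstMismatch, if_pos (beq_self_eq_true a)]
          by_cases hle : l.length ≤ firstMismatch l r + 1
          · rw [if_pos (by simpa using hle), if_pos hle]
          · rw [if_neg (by simpa using hle), if_neg hle]
            simp [List.getD]
        rw [hA, hB, ih r hlen]
      · -- first mismatch at the head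
        have hA0 : pyDiffs (a :: l) (b :: r) 0 = 0 :: (pyDiffs l r 0).map (· + 1) := by
          rw [pyDiffs_cons, if_neg hab, show (0 : Int) + 1 = 0 + 1 from rfl, pyDiffs_shift]
        cases l with
        | nil =>
          -- length 1: one difference only on A's side; no room on B's side
          cases r with
          | nil =>
            simp [aCore, bCore, hA0, pyDiffs_nil_left, firstMismatch, hab]
          | cons d r => simp at hlen
        | cons c l' =>
          cases r with
          | nil => simp at hlen
          | cons d r' =>
            simp only [List.length_cons, Nat.add_right_cancel_iff] at hlen
            have hB : bCore (a :: c :: l') (b :: d :: r') =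
                ((c = b : Bool) && (a = d : Bool) && (l' = r' : Bool)) := by
              have hab' : (a == b) = false := by simpa using hab
              unfold bCore
              rw [show firstMismatch (a :: c :: l') (b :: d :: r') = 0 from by
                    simp [firstMismatch, hab']]
              rw [if_neg (by simp only [List.length_cons]; omega)]
              simp only [List.take_zero, List.drop_succ_cons, List.drop_zero, List.getD,
                List.nil_append, List.cons_append, List.getElem?_cons_succ,
                List.getElem?_cons_zero, Option.getD_some]
              by_cases h1 : c = b <;> by_cases h2 : a = d <;> by_cases h3 : l' = r' <;>
                simp [h1, h2, h3]
            rw [hB]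
            unfold aCore
            rw [hA0]
            rcases hds : pyDiffs (c :: l') (d :: r') 0 with _ | ⟨f, ds⟩
            · -- tails equal ⇒ c = d, so with a ≠ b the swap check fails on both sides
              rw [pyDiffs_nil_iff _ _ _ (by simp [hlen])] at hds
              injection hds with hcd hlr
              simp only [List.map_nil, hcd, hlr]
              by_cases h1 : d = b <;> by_cases h2 : a = d
              · exact absurd (h2.trans h1) hab
              · simp [h1, hab]
              · simp [h1, h2]
              · simp [h1, h2]
            · cases ds with
              | cons g ds' =>
                -- three or more differences on A's side: A is false; B too
                simp only [List.map_cons]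
                have hc : ¬ (c = b ∧ a = d ∧ l' = r') := by
                  intro ⟨h1, h2, h3⟩
                  subst h1; subst h2; subst h3
                  have hone : pyDiffs (c :: l') (a :: l') 0 = [0] := by
                    rw [pyDiffs_cons, if_neg (fun h => hab h.symm), pyDiffs_shift,
                        (pyDiffs_nil_iff l' l' 0 rfl).mpr rfl]
                    rfl
                  rw [hds] at hone; simp at hone
                by_cases h1 : c = b <;> by_cases h2 : a = d <;> by_cases h3 : l' = r' <;>
                  simp [h1, h2, h3] <;> tauto
              | nil =>
                -- exactly one difference in the tails, at index f
                have hf0 : ∃ k : Nat, k < ((c :: l').zip (d :: r')).length ∧ f = (0:Int) + k := by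
                  exact mem_pyDiffs _ _ 0 f (by rw [hds]; simp)
                obtain ⟨k, hk, rfl⟩ := hf0
                simp only [List.map_cons, List.map_nil]
                by_cases hk0 : k = 0
                · subst hk0
                  -- difference at tail head: A checks the swap, B checks the candidate
                  have hcd : c ≠ d ∧ l' = r' := by
                    have h1 := hds
                    rw [pyDiffs_cons] at h1
                    by_cases hcd' : c = d
                    · rw [if_pos hcd'] at h1
                      exfalso
                      obtain ⟨k', _, hk'⟩ := mem_pyDiffs l' r' (0+1) ((0:Int)+(0:Nat))
                        (by rw [h1]; simp)
                      omega
                    · rw [if_neg hcd'] at h1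
                      injection h1 with _ h2
                      rw [show (0:Int) + 1 = 0 + 1 from rfl, pyDiffs_shift] at h2
                      have : pyDiffs l' r' 0 = [] := by
                        cases hx : pyDiffs l' r' 0
                        · rfl
                        · rw [hx] at h2; simp at h2
                      exact ⟨hcd', (pyDiffs_nil_iff _ _ _ hlen).mp this⟩
                  obtain ⟨hcd, hlr⟩ := hcd
                  subst hlr
                  simp only [Nat.cast_zero, add_zero]
                  rw [if_neg (by simp)]
                  simp only [List.getD_cons_zero, List.getD_cons_succ,
                    show ((0 + 1 : Int) != 0 + 1) = false from rfl, Bool.false_eq_true, if_false]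
                  have g1 : PySem.List.pyGetD (a :: c :: l') 0 ' ' = a := by
                    simp [PySem.List.pyGetD_zero_cons]
                  have g2 : PySem.List.pyGetD (b :: d :: l') 0 ' ' = b := by
                    simp [PySem.List.pyGetD_zero_cons]
                  have g3 : PySem.List.pyGetD (a :: c :: l') (0+1) ' ' = c := by
                    rw [pyGetD_cons_succ _ _ 0 le_rfl]; simp [PySem.List.pyGetD_zero_cons]
                  have g4 : PySem.List.pyGetD (b :: d :: l') (0+1) ' ' = d := by
                    rw [pyGetD_cons_succ _ _ 0 le_rfl]; simp [PySem.List.pyGetD_zero_cons]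
                  rw [g1, g2, g3, g4]
                  by_cases h1 : c = b <;> by_cases h2 : a = d <;> simp [h1, h2]
                · -- difference further in: not adjacent to 0, A false; B false too
                  simp only [List.map_cons, List.map_nil, List.getD_cons_zero,
                    List.getD_cons_succ]
                  rw [if_neg (by simp), if_pos (by simp only [bne_iff_ne]; omega)]
                  have hc : ¬ (c = b ∧ a = d ∧ l' = r') := by
                    intro ⟨h1, h2, h3⟩
                    subst h1; subst h2; subst h3
                    have h4 := hds
                    rw [pyDiffs_cons, if_neg (fun h => hab h.symm)] at h4
                    injection h4 with h5 _
                    omega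
                  by_cases h1 : c = b <;> by_cases h2 : a = d <;> by_cases h3 : l' = r' <;>
                    simp [h1, h2, h3] <;> tauto

-- ===== VERDICT (by name: the statement is the Claim_ definition above) =====
theorem is_single_transposition_spec : Claim_equal_is_single_transposition := by
  intro left right _
  unfold Spec_is_single_transposition is_single_transposition is_single_transposition_alt
  simp only []
  by_cases hg : left.toList.length != right.toList.length || left.toList.length < 2
  · rw [if_pos hg, if_pos hg]
  · rw [if_neg hg, if_neg hg]
    have hlen : left.toList.length = right.toList.length := by
      simp only [Bool.or_eq_true, bne_iff_ne, decide_eq_true_eq, not_or] at hg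
      exact not_not.mp hg.1
    exact core_eq left.toList right.toList hlen
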